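-- pv_equiv track=rewrite | github.com/QasimGardaizi-AITeam/parquet-pipeline | execution/tools.py | build_path_mapping
-- ===== SOURCE A (Python) =====
-- from typing import Any, Dict, List, Optional, Tuple
--
-- def build_path_mapping(
--     required_files: List[str], global_catalog_dict: Dict[str, Any]
-- ) -> Dict[str, str]:
--     """
--     Build mapping of file names to Azure URIs.
--
--     Args:
--         required_files: List of required file names
--         global_catalog_dict: Global catalog dictionary
--
--     Returns:
--         Dictionary mapping file names to URIs
--     """
--     path_map = {}
--
--     if not required_files or required_files == ["*"]:
--         return path_map
--
--     for file_name in required_files: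
--         for logical_name, file_info in global_catalog_dict.items():
--             if file_info.get("file_name") == file_name or logical_name == file_name:
--                 uri = file_info.get("azure_uri") or file_info.get("parquet_path")
--                 if uri:
--                     path_map[file_name] = uri
--                 break
--
--     return path_map
-- ===== SOURCE B (Python) =====
-- def build_path_mapping(required_files, global_catalog_dict):
--     """Map file names to catalog URIs: one pass over the catalog builds a
--     first-match-wins name index, then required_files are resolved by lookup."""
--     path_map = {}
--     if not required_files or required_files == ["*"]:
--         return path_map
--     index = {}
--     for logical_name, file_info in global_catalog_dict.items():
--         uri = file_info.get("azure_uri") or file_info.get("parquet_path") or None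
--         for name in (logical_name, file_info.get("file_name")):
--             if name is not None and name not in index:
--                 index[name] = uri
--     for file_name in required_files:
--         if file_name in index and index[file_name] is not None:
--             path_map[file_name] = index[file_name]
--     return path_map
-- ===== Notes on version B (the rewrite author's own statement) =====
-- stated objective: faster
-- what changed: Replaces A's rescans of the whole catalog for every required file by a single pass over the catalog that builds a first-match-wins name-to-uri index, after which each required file is resolved by one dictionary lookup.
import Mathlib
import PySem

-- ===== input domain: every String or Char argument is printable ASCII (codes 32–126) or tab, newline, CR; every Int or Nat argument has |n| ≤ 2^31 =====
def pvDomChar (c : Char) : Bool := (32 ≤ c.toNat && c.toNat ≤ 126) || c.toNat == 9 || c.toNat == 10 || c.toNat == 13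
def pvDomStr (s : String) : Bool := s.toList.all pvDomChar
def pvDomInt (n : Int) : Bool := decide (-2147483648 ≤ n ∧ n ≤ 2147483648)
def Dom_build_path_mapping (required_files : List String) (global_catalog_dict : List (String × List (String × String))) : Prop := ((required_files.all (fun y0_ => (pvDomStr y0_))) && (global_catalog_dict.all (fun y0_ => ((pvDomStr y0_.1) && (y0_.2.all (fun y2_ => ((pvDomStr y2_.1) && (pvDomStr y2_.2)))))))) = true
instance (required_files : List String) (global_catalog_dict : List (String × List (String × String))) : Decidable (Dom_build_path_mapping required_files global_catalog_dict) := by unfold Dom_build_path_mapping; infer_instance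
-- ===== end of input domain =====

-- B replaces A's nested scan of the catalog per required file by one pass that builds a
-- first-match-wins name→uri index, then resolves each required file by a single lookup.

-- dict.get(k) on an association list (first match), shared dict primitive of both ports
def pvGetStr (fi : List (String × String)) (k : String) : Option String :=
  (fi.find? (fun p => p.1 == k)).map (·.2)

-- ===== PORT A =====
-- the inner 'for logical_name, file_info … break' loop of A
def pvFindEntryA (file_name : String) : List (String × List (String × String)) → Option (List (String × String))
  | [] => none
  | (logical_name, file_info) :: rest =>
      if pvGetStr file_info "file_name" == some file_name || logical_name == file_name then
        some file_info
      else pvFindEntryA file_name rest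

def build_path_mapping (required_files : List String) (global_catalog_dict : List (String × List (String × String))) : List (String × String) :=
  if required_files = [] ∨ required_files = ["*"] then [] else
  (required_files.foldl (fun path_map file_name =>
      match pvFindEntryA file_name global_catalog_dict with
      | none => path_map
      | some file_info =>
          -- uri = file_info.get("azure_uri") or file_info.get("parquet_path")
          let uri : Option String :=
            match pvGetStr file_info "azure_uri" with
            | some s => if s == "" then pvGetStr file_info "parquet_path" else some s
            | none => pvGetStr file_info "parquet_path"
          -- if uri: path_map[file_name] = uri
          match uri with
          | some u => if u == "" then path_map else path_map.insert file_name u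
          | none => path_map)
    (PySem.Dict.empty : PySem.Dict String String)).items

-- ===== PORT B =====
-- '… or None' truthiness normalisation: "" and missing both become none
def pvOrNone (o : Option String) : Option String :=
  match o with
  | some s => if s == "" then none else some s
  | none => none

-- uri = file_info.get("azure_uri") or file_info.get("parquet_path") or None
def pvUriB (file_info : List (String × String)) : Option String :=
  match pvGetStr file_info "azure_uri" with
  | some s => if s == "" then pvOrNone (pvGetStr file_info "parquet_path") else some s
  | none => pvOrNone (pvGetStr file_info "parquet_path")

-- 'if name is not None and name not in index: index[name] = uri'
def pvAddName (idx : PySem.Dict String (Option String)) (name : Option String) (uri : Option String) : PySem.Dict String (Option String) :=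
  match name with
  | none => idx
  | some n => if idx.contains n then idx else idx.insert n uri

-- the single pass over the catalog building the name index
def pvBuildIndex (global_catalog_dict : List (String × List (String × String))) : PySem.Dict String (Option String) :=
  global_catalog_dict.foldl (fun idx e =>
    pvAddName (pvAddName idx (some e.1) (pvUriB e.2)) (pvGetStr e.2 "file_name") (pvUriB e.2))
    PySem.Dict.empty

def build_path_mapping_alt (required_files : List String) (global_catalog_dict : List (String × List (String × String))) : List (String × String) :=
  if required_files = [] ∨ required_files = ["*"] then [] else
  let index := pvBuildIndex global_catalog_dict
  (required_files.foldl (fun path_map file_name =>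
      match index.get? file_name with
      | some (some u) => path_map.insert file_name u
      | _ => path_map)
    (PySem.Dict.empty : PySem.Dict String String)).items

-- ===== PRECONDITION & SPEC =====
def Spec_build_path_mapping (required_files : List String) (global_catalog_dict : List (String × List (String × String))) (out : List (String × String)) : Prop := out = build_path_mapping_alt required_files global_catalog_dict
instance (required_files : List String) (global_catalog_dict : List (String × List (String × String))) (out : List (String × String)) : Decidable (Spec_build_path_mapping required_files global_catalog_dict out) := by unfold Spec_build_path_mapping; infer_instance

-- ===== CLAIM (what is proved, stated in full; the proofs are below) =====
def Claim_equal_build_path_mapping : Prop := ∀ (required_files : List String) (global_catalog_dict : List (String × List (String × String))), Dom_build_path_mapping required_files global_catalog_dict → Spec_build_path_mapping required_files global_catalog_dict (build_path_mapping required_files global_catalog_dict)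


-- ===== LEMMAS AND PROOFS =====

-- A's uri-filtering branch computes exactly 'match pvUriB fi with …'
lemma uriA_eq (fi : List (String × String)) (pm : PySem.Dict String String) (fn : String) :
    (match (match pvGetStr fi "azure_uri" with
            | some s => if s == "" then pvGetStr fi "parquet_path" else some s
            | none => pvGetStr fi "parquet_path") with
     | some u => if u == "" then pm else pm.insert fn u
     | none => pm)
    = (match pvUriB fi with
       | some u => pm.insert fn u
       | none => pm) := by
  unfold pvUriB pvOrNone
  cases h1 : pvGetStr fi "azure_uri" with
  | none =>
      cases h2 : pvGetStr fi "parquet_path" with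
      | none => simp
      | some t => by_cases ht : t == "" <;> simp [ht]
  | some s =>
      by_cases hs : s == ""
      · cases h2 : pvGetStr fi "parquet_path" with
        | none => simp [hs]
        | some t => by_cases ht : t == "" <;> simp [hs, ht]
      · simp [hs]

lemma addName_get (idx : PySem.Dict String (Option String)) (nm : Option String) (u : Option String) (fn : String) :
    (pvAddName idx nm u).get? fn
    = (match idx.get? fn with
       | some v => some v
       | none => if nm == some fn then some u else none) := by
  cases nm with
  | none => cases h : idx.get? fn <;> simp [pvAddName, h]
  | some n =>
      have hd : pvAddName idx (some n) u = if idx.contains n = true then idx else idx.insert n u := rfl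
      rw [hd]
      by_cases hc : idx.contains n = true
      · rw [if_pos hc]
        cases h : idx.get? fn with
        | some v => simp
        | none =>
            have hne : ¬ (n = fn) := by
              intro he
              rw [PySem.Dict.contains_eq_isSome_get?, he, h] at hc
              simp at hc
            simp [hne]
      · rw [if_neg hc]
        have hn : idx.get? n = none := by
          rw [PySem.Dict.contains_eq_isSome_get?] at hc
          cases hg : idx.get? n
          · rfl
          · rw [hg] at hc; simp at hc
        rw [PySem.Dict.get?_insert]
        by_cases hnf : fn = n
        · subst hnf; simp [hn]
        · have hne : ¬ (n = fn) := fun he => hnf he.symm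
          cases h : idx.get? fn <;> simp [hnf, hne]

lemma idx_get (cat : List (String × List (String × String))) (idx : PySem.Dict String (Option String)) (fn : String) :
    (cat.foldl (fun idx e =>
        pvAddName (pvAddName idx (some e.1) (pvUriB e.2)) (pvGetStr e.2 "file_name") (pvUriB e.2)) idx).get? fn
    = (match idx.get? fn with
       | some v => some v
       | none => (pvFindEntryA fn cat).map pvUriB) := by
  induction cat generalizing idx with
  | nil => cases h : idx.get? fn <;> simp [h, pvFindEntryA]
  | cons e rest ih =>
      obtain ⟨ln, fi⟩ := e
      rw [List.foldl_cons, ih, addName_get, addName_get]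
      cases h : idx.get? fn with
      | some v => simp
      | none =>
          simp only [pvFindEntryA]
          by_cases hfn : pvGetStr fi "file_name" = some fn <;>
            by_cases hln : ln = fn <;>
              first
              | simp [hfn, hln]
              | simp [h, hfn, hln]

lemma step_eq (cat : List (String × List (String × String))) (pm : PySem.Dict String String) (fn : String) :
    (match pvFindEntryA fn cat with
     | none => pm
     | some fi =>
         match (match pvGetStr fi "azure_uri" with
                | some s => if s == "" then pvGetStr fi "parquet_path" else some s
                | none => pvGetStr fi "parquet_path") with
         | some u => if u == "" then pm else pm.insert fn u
         | none => pm)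
    = (match (pvBuildIndex cat).get? fn with
       | some (some u) => pm.insert fn u
       | _ => pm) := by
  unfold pvBuildIndex
  rw [idx_get, PySem.Dict.get?_empty]
  cases h : pvFindEntryA fn cat with
  | none => simp
  | some fi =>
      simp only [Option.map_some]
      rw [uriA_eq]
      cases hu : pvUriB fi <;> simp

-- ===== VERDICT (by name: the statement is the Claim_ definition above) =====
theorem build_path_mapping_spec : Claim_equal_build_path_mapping := by
  intro required_files global_catalog_dict _
  unfold Spec_build_path_mapping build_path_mapping build_path_mapping_alt
  by_cases hg : required_files = [] ∨ required_files = ["*"]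
  · rw [if_pos hg, if_pos hg]
  · rw [if_neg hg, if_neg hg]
    congr 1
    apply PySem.List.foldl_congr_mem
    intro pm fn _
    exact step_eq global_catalog_dict pm fn
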